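-- pv_equiv track=rewrite | github.com/Joshua-Gordon/adventofcode2019 | Day4/main.py | check_doubles_2
-- ===== SOURCE A (Python) =====
-- def check_doubles_2(n):
--     """Returns true if there is a character repeated exactly twice in a row"""
--     num = str(n)
--     for c in set(num):
--         if num.count(c) == 2:
--             pos = num.find(c)
--             if pos != len(num)-1 and num[pos+1] == c:
--                 return True
--     return False
-- ===== SOURCE B (Python) =====
-- def check_doubles_2(n):
--     """Returns true if there is a character repeated exactly twice in a row"""
--     num = str(n)
--     return any(a == b and num.count(a) == 2 for a, b in zip(num, num[1:]))
-- ===== Notes on version B (the rewrite author's own statement) =====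
-- stated objective: simpler
-- what changed: B replaces A's loop over set(num) with count/find/first-occurrence index checks by a single idiomatic any() over adjacent character pairs (zip(num, num[1:])), keeping the total-count==2 guard.
import Mathlib
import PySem

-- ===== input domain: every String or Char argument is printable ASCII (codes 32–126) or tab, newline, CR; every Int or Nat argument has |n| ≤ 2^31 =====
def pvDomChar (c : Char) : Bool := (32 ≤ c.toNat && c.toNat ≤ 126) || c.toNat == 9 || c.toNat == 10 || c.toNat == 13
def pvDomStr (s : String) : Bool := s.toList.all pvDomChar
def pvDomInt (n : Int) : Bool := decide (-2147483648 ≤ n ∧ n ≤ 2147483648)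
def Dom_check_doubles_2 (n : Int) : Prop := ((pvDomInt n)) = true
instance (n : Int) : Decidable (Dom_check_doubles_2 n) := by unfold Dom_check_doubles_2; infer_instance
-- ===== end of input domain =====

-- B replaces A's loop over set(num) (count/find/first-occurrence checks per distinct char)
-- by a single any() over adjacent character pairs; same return value, simpler decomposition.

-- ===== PORT A =====
def check_doubles_2 (n : Int) : Bool :=
  let num := PySem.Int.toChars n
  -- 'for c in set(num)': Python's set iteration order is unspecified, but the loop only
  -- returns True on a hit and carries no other state, so the result is order-independent;
  -- ported over the distinct elements PySem.Set.ofList num.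
  (PySem.Set.ofList num).any (fun c =>
    if PySem.Chars.count num [c] == 2 then
      -- pos = num.find(c)
      let pos := PySem.Chars.find num [c]
      -- 'pos != len(num)-1 and num[pos+1] == c'; under the first conjunct pos+1 is in
      -- range (count == 2 means c occurs, so 0 <= pos <= len-1), hence '== some c' is
      -- exact for Python's num[pos+1] == c.
      decide (pos ≠ (num.length : Int) - 1) && (PySem.List.pyGet? num (pos + 1) == some c)
    else false)

-- ===== PORT B =====
def check_doubles_2_alt (n : Int) : Bool :=
  let num := PySem.Int.toChars n
  -- any(a == b and num.count(a) == 2 for a, b in zip(num, num[1:]));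
  -- num[1:] is num.tail (PySem.List.slice_from_one)
  (num.zip num.tail).any (fun p => p.1 == p.2 && PySem.Chars.count num [p.1] == 2)

-- ===== PRECONDITION & SPEC =====
def Spec_check_doubles_2 (n : Int) (out : Bool) : Prop := out = check_doubles_2_alt n
instance (n : Int) (out : Bool) : Decidable (Spec_check_doubles_2 n out) := by unfold Spec_check_doubles_2; infer_instance

-- ===== CLAIM (what is proved, stated in full; the proofs are below) =====
def Claim_equal_check_doubles_2 : Prop := ∀ (n : Int), Dom_check_doubles_2 n → Spec_check_doubles_2 n (check_doubles_2 n)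

-- ===== LEMMAS AND PROOFS =====

-- Python str.count with a single-character needle is List.count (fuel-indexed helper first).
lemma count_go_singleton (c : Char) : ∀ (fuel : Nat) (l : List Char) (acc : Nat),
    l.length ≤ fuel → PySem.Chars.count.go [c] fuel l acc = acc + l.count c := by
  intro fuel
  induction fuel with
  | zero =>
    intro l acc h
    have : l = [] := List.eq_nil_of_length_eq_zero (Nat.le_zero.mp h)
    subst this
    rw [PySem.Chars.count.go.eq_def]
    simp
  | succ f ih =>
    intro l acc h
    cases l with
    | nil => rw [PySem.Chars.count.go.eq_def]; simp
    | cons a t =>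
      rw [PySem.Chars.count.go.eq_def]
      simp only [List.isPrefixOf]
      by_cases hc : c = a
      · subst hc
        simp [ih t (acc + 1) (by simpa using h)]
        omega
      · simp [beq_iff_eq, hc, ih t acc (by simpa using h), Ne.symm hc]

lemma count_singleton (l : List Char) (c : Char) :
    PySem.Chars.count l [c] = l.count c := by
  rw [PySem.Chars.count]
  simp [count_go_singleton c l.length l 0 le_rfl]

-- A's per-character test (count == 2, first occurrence followed by the same char)
-- says exactly that l contains the adjacent pair [c, c].
lemma a_cond_iff (l : List Char) (c : Char) (h : l.count c = 2) :
    ((decide (PySem.Chars.find l [c] ≠ (l.length : Int) - 1) &&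
      (PySem.List.pyGet? l (PySem.Chars.find l [c] + 1) == some c)) = true)
      ↔ [c, c] <:+: l := by
  have hmem : c ∈ l := List.count_pos_iff.mp (by omega)
  have hnn : 0 ≤ PySem.Chars.find l [c] :=
    (PySem.Chars.find_nonneg_iff _ _).mpr ((List.singleton_infix_iff c l).mpr hmem)
  obtain ⟨hpre, hmin⟩ := PySem.Chars.find_spec hnn
  set pos : Int := PySem.Chars.find l [c] with hposdef
  set p : Nat := pos.toNat with hp
  have hposp : pos = (p : Int) := by omega
  obtain ⟨rest, hdrop⟩ : ∃ rest, l.drop p = c :: rest := by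
    obtain ⟨t2, ht2⟩ := hpre
    exact ⟨t2, by simpa using ht2.symm⟩
  have hplt : p < l.length := by
    have := congrArg List.length hdrop
    simp at this
    omega
  constructor
  · rintro hb
    simp only [Bool.and_eq_true, decide_eq_true_eq, beq_iff_eq] at hb
    obtain ⟨hne, hget⟩ := hb
    rw [hposp] at hget
    have : ((p : Int) + 1) = ((p + 1 : Nat) : Int) := by push_cast; ring
    rw [this, PySem.List.pyGet?_natCast] at hget
    have hgetd : (l.drop p)[1]? = some c := by
      rw [List.getElem?_drop]; simpa using hget
    rw [hdrop] at hgetd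
    simp at hgetd
    obtain ⟨rest', hrest'⟩ : ∃ rest', rest = c :: rest' := by
      cases rest with
      | nil => simp at hgetd
      | cons x xs => simp at hgetd; exact ⟨xs, by rw [hgetd]⟩
    refine List.infix_iff_prefix_suffix.mpr ⟨l.drop p, ?_, List.drop_suffix _ _⟩
    rw [hdrop, hrest']
    exact ⟨rest', rfl⟩
  · rintro hinf
    obtain ⟨s, t, hst⟩ := hinf
    have hcount : s.count c = 0 ∧ t.count c = 0 := by
      have := h
      rw [← hst] at this
      simp [List.count_append] at this
      omega
    have hcs : c ∉ s := by
      intro hm; have := List.count_pos_iff.mpr hm; omega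
    -- find l c is exactly s.length, the first occurrence
    have hpres : [c] <+: l.drop s.length := by
      rw [← hst]; simp
    have hple : p ≤ s.length := by
      by_contra hlt
      exact hmin s.length (by omega) hpres
    have hpge : ¬ (p < s.length) := by
      intro hlt
      have : l[p]? = some c := by
        have := congrArg (fun x => x[0]?) hdrop
        simpa [List.getElem?_drop] using this
      have hsp : l[p]? = s[p]? := by
        rw [← hst, List.append_assoc]
        exact List.getElem?_append_left hlt
      rw [hsp] at this
      exact hcs (List.mem_of_getElem? this)
    have hpeq : p = s.length := by omega
    have hlen : l.length = s.length + 2 + t.length := by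
      rw [← hst]; simp; omega
    simp only [Bool.and_eq_true]
    constructor
    · simp only [decide_eq_true_eq]
      rw [hposp, hpeq]
      intro hcon
      have : (s.length : Int) = l.length - 1 := hcon
      omega
    · simp only [beq_iff_eq]
      rw [hposp, hpeq]
      have : ((s.length : Int) + 1) = ((s.length + 1 : Nat) : Int) := by push_cast; ring
      rw [this, PySem.List.pyGet?_natCast, ← hst, List.append_assoc]
      rw [List.getElem?_append_right (by omega)]
      simp

-- B's adjacent-pair scan finds a pair (c, c) with full count 2 iff such an infix exists.
lemma b_any_iff (F : List Char) : ∀ (l : List Char),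
    (((l.zip l.tail).any (fun p => p.1 == p.2 && F.count p.1 == 2)) = true)
      ↔ ∃ c, F.count c = 2 ∧ [c, c] <:+: l := by
  intro l
  induction l with
  | nil => simp
  | cons a l' ih =>
    cases l' with
    | nil =>
      simp only [List.tail_cons, List.zip_nil_right, List.any_nil, Bool.false_eq_true, false_iff]
      rintro ⟨c, -, hinf⟩
      have := hinf.length_le
      simp at this
    | cons b t =>
      simp only [List.tail_cons, List.zip_cons_cons, List.any_cons, Bool.or_eq_true,
        Bool.and_eq_true, beq_iff_eq]
      rw [show ((b :: t).tail) = t from rfl] at ih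
      rw [ih]
      constructor
      · rintro (⟨hab, hcnt⟩ | ⟨c, hc, hinf⟩)
        · subst hab
          exact ⟨a, hcnt, ⟨[], t, rfl⟩⟩
        · exact ⟨c, hc, hinf.trans (List.suffix_cons a (b :: t)).isInfix⟩
      · rintro ⟨c, hc, hinf⟩
        rcases List.infix_cons_iff.mp hinf with hpre | hinf'
        · rcases List.cons_prefix_cons.mp hpre with ⟨rfl, hpre2⟩
          rcases List.cons_prefix_cons.mp hpre2 with ⟨rfl, -⟩
          exact Or.inl ⟨rfl, hc⟩
        · exact Or.inr ⟨c, hc, hinf'⟩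

-- ===== VERDICT (by name: the statement is the Claim_ definition above) =====
theorem check_doubles_2_spec : Claim_equal_check_doubles_2 := by
  intro n _
  unfold Spec_check_doubles_2 check_doubles_2 check_doubles_2_alt
  set num := PySem.Int.toChars n with hnum
  simp only [count_singleton]
  rw [Bool.eq_iff_iff]
  rw [List.any_eq_true, b_any_iff num num]
  constructor
  · rintro ⟨c, hcmem, hf⟩
    by_cases hcnt : num.count c = 2
    · refine ⟨c, hcnt, ?_⟩
      rw [if_pos (by simpa using hcnt)] at hf
      exact (a_cond_iff num c hcnt).mp hf
    · rw [if_neg (by simpa using hcnt)] at hf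
      exact absurd hf (by simp)
  · rintro ⟨c, hcnt, hinf⟩
    have hmem : c ∈ num := List.count_pos_iff.mp (by omega)
    refine ⟨c, (PySem.Set.mem_ofList num c).mpr hmem, ?_⟩
    rw [if_pos (by simpa using hcnt)]
    exact (a_cond_iff num c hcnt).mpr hinf
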